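-- pv_equiv track=rewrite | github.com/midhun98/UDEMY-DSA | 39_can_be_rotated.py | can_be_rotated
-- ===== SOURCE A (Python) =====
-- def can_be_rotated(mat, target):
--     length = len(mat)
--     for _ in range(4):
--         out = []
--         for i in range(length):
--             row = []
--             for j in range(length - 1, -1, -1):
--                 row.append(mat[j][i])
--             out.append(row)
--         mat = out
--         if target == mat:
--             return True
--     return False
-- ===== SOURCE B (Python) =====
-- def can_be_rotated(mat, target):
--     n = len(mat)
--
--     def matches(f):
--         return len(target) == n and all(
--             len(target[i]) == n and all(target[i][j] == f(i, j) for j in range(n))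
--             for i in range(n)
--         )
--
--     orientations = [
--         lambda i, j: mat[n - 1 - j][i],          # 90 degrees
--         lambda i, j: mat[n - 1 - i][n - 1 - j],  # 180 degrees
--         lambda i, j: mat[j][n - 1 - i],          # 270 degrees
--         lambda i, j: mat[i][j],                  # 360 degrees (identity)
--     ]
--     return any(matches(f) for f in orientations)
-- ===== Notes on version B (the rewrite author's own statement) =====
-- stated objective: faster
-- what changed: B never constructs rotated matrices: it checks target's shape once and compares target to mat entrywise under the four rotation coordinate maps (with short-circuit on the first mismatch), instead of A's repeated materialisation of four rotated copies.
import Mathlib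
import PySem

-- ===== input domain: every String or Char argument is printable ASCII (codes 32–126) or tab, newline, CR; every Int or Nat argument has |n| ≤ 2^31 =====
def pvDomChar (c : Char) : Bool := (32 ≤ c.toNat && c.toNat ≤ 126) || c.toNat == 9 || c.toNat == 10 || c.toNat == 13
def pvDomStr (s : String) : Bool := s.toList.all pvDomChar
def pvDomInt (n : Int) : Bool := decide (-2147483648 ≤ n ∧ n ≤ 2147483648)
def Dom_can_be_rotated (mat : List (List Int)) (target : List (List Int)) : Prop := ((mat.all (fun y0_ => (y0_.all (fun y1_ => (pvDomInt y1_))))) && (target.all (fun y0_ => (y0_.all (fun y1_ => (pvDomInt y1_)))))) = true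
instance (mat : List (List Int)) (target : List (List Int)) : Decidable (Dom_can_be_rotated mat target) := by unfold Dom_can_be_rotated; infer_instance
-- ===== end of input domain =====

-- B checks target against mat through the four rotation coordinate maps instead of building
-- the four rotated matrices A materialises; same value everywhere A returns (objective: alternative).

-- ===== PORT A =====
-- one 90-degree rotation step of A's body: out[i] = [mat[j][i] for j = length-1 .. 0]
-- (indices are in range under Pre_; .getD mirrors the in-range Python indexing exactly)
def pvRotA (n : Nat) (mat : List (List Int)) : List (List Int) :=
  (List.range n).map (fun i =>
    ((List.range n).reverse).map (fun j => (mat.getD j []).getD i 0))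

-- the 'for _ in range(4)' loop with Python's early 'return True'
def pvGoA (target : List (List Int)) (n : Nat) : Nat → List (List Int) → Bool
  | 0, _ => false
  | k+1, mat =>
    let out := pvRotA n mat
    if target = out then true else pvGoA target n k out

def can_be_rotated (mat : List (List Int)) (target : List (List Int)) : Bool :=
  pvGoA target mat.length 4 mat

-- ===== PORT B =====
-- Source B's 'matches(f)': shape check plus entrywise comparison against the coordinate map f
def pvMatches (target : List (List Int)) (n : Nat) (f : Nat → Nat → Int) : Bool :=
  target.length == n &&
  (List.range n).all (fun i =>
    (target.getD i []).length == n &&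
    (List.range n).all (fun j => (target.getD i []).getD j 0 == f i j))

def can_be_rotated_alt (mat : List (List Int)) (target : List (List Int)) : Bool :=
  let n := mat.length
  let g : Nat → Nat → Int := fun a b => (mat.getD a []).getD b 0
  pvMatches target n (fun i j => g (n-1-j) i) ||          -- 90 degrees
  pvMatches target n (fun i j => g (n-1-i) (n-1-j)) ||    -- 180 degrees
  pvMatches target n (fun i j => g j (n-1-i)) ||          -- 270 degrees
  pvMatches target n (fun i j => g i j)                   -- identity

-- ===== PRECONDITION & SPEC =====
-- Pre_ excludes exactly the inputs on which Python A raises IndexError: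
-- mat[j][i] needs every row of mat to have at least len(mat) entries.
def Pre_can_be_rotated (mat : List (List Int)) (target : List (List Int)) : Prop :=
  ∀ row ∈ mat, mat.length ≤ row.length
instance (mat : List (List Int)) (target : List (List Int)) : Decidable (Pre_can_be_rotated mat target) := by unfold Pre_can_be_rotated; infer_instance
def pvWitness_can_be_rotated : List (List Int) × List (List Int) := ([[1,2],[3,4]], [[3,1],[4,2]])

def Spec_can_be_rotated (mat : List (List Int)) (target : List (List Int)) (out : Bool) : Prop := out = can_be_rotated_alt mat target
instance (mat : List (List Int)) (target : List (List Int)) (out : Bool) : Decidable (Spec_can_be_rotated mat target out) := by unfold Spec_can_be_rotated; infer_instance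

-- ===== CLAIM (what is proved, stated in full; the proofs are below) =====
def Claim_equal_can_be_rotated : Prop := ∀ (mat : List (List Int)) (target : List (List Int)), Dom_can_be_rotated mat target → Pre_can_be_rotated mat target → Spec_can_be_rotated mat target (can_be_rotated mat target)

-- ===== LEMMAS AND PROOFS =====

-- the n×n matrix whose (i,j) entry is f i j
def pvMapM (n : Nat) (f : Nat → Nat → Int) : List (List Int) :=
  (List.range n).map (fun i => (List.range n).map (f i))

theorem pvMapM_congr (n : Nat) (f f' : Nat → Nat → Int)
    (h : ∀ i < n, ∀ j < n, f i j = f' i j) : pvMapM n f = pvMapM n f' := by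
  unfold pvMapM
  refine List.map_congr_left ?_
  intro i hi
  refine List.map_congr_left ?_
  intro j hj
  exact h i (List.mem_range.mp hi) j (List.mem_range.mp hj)

theorem pvReverseRange (n : Nat) : (List.range n).reverse = (List.range n).map (fun j => n - 1 - j) := by
  rw [List.range_eq_range', List.reverse_range']
  simp [List.range_eq_range']

theorem pvRotA_eq (n : Nat) (mat : List (List Int)) :
    pvRotA n mat = pvMapM n (fun i j => (mat.getD (n-1-j) []).getD i 0) := by
  unfold pvRotA pvMapM
  refine List.map_congr_left ?_
  intro i _
  rw [pvReverseRange, List.map_map]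
  rfl

theorem pvMapM_getD_row (n : Nat) (f : Nat → Nat → Int) (i : Nat) (hi : i < n) :
    ((pvMapM n f).getD i []) = (List.range n).map (f i) := by
  unfold pvMapM
  rw [List.getD_eq_getElem?_getD, List.getElem?_map, List.getElem?_range hi]
  simp

theorem pvMapM_getD (n : Nat) (f : Nat → Nat → Int) (a b : Nat) (ha : a < n) (hb : b < n) :
    ((pvMapM n f).getD a []).getD b 0 = f a b := by
  rw [pvMapM_getD_row n f a ha]
  rw [List.getD_eq_getElem?_getD, List.getElem?_map, List.getElem?_range hb]
  simp

theorem pvRotA_mapM (n : Nat) (f : Nat → Nat → Int) :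
    pvRotA n (pvMapM n f) = pvMapM n (fun i j => f (n-1-j) i) := by
  rw [pvRotA_eq]
  refine pvMapM_congr _ _ _ ?_
  intro i hi j hj
  exact pvMapM_getD n f (n-1-j) i (by omega) hi

theorem pvMatches_iff (target : List (List Int)) (n : Nat) (f : Nat → Nat → Int) :
    pvMatches target n f = true ↔ target = pvMapM n f := by
  unfold pvMatches
  simp only [Bool.and_eq_true, beq_iff_eq, List.all_eq_true, List.mem_range]
  constructor
  · rintro ⟨hlen, hrows⟩
    have hlenM : (pvMapM n f).length = n := by simp [pvMapM]
    refine List.ext_getElem (by rw [hlen, hlenM]) ?_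
    intro i hi hi'
    have hin : i < n := by simpa [hlen] using hi
    obtain ⟨hrlen, hent⟩ := hrows i hin
    have hrow : target[i] = target.getD i [] := (List.getD_eq_getElem target [] hi).symm
    have hM : (pvMapM n f)[i] = (List.range n).map (f i) := by
      rw [← pvMapM_getD_row n f i hin]
      exact (List.getD_eq_getElem _ [] hi').symm
    rw [hrow, hM]
    refine List.ext_getElem (by simpa using hrlen) ?_
    intro j hj hj'
    have hjn : j < n := by simpa using hj'
    have := hent j hjn
    rw [List.getD_eq_getElem (target.getD i []) 0 hj] at this
    rw [this, List.getElem_map, List.getElem_range]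
  · rintro rfl
    refine ⟨by simp [pvMapM], ?_⟩
    intro i hi
    refine ⟨by rw [pvMapM_getD_row n f i hi]; simp, ?_⟩
    intro j hj
    exact pvMapM_getD n f i j hi hj

-- ===== VERDICT (by name: the statement is the Claim_ definition above) =====
theorem can_be_rotated_spec : Claim_equal_can_be_rotated := by
  intro mat target _ _
  unfold Spec_can_be_rotated can_be_rotated can_be_rotated_alt
  set n := mat.length with hn
  set g : Nat → Nat → Int := fun a b => (mat.getD a []).getD b 0 with hg
  have h1 : pvRotA n mat = pvMapM n (fun i j => g (n-1-j) i) := pvRotA_eq n mat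
  have h2 : pvRotA n (pvMapM n (fun i j => g (n-1-j) i)) = pvMapM n (fun i j => g (n-1-i) (n-1-j)) := by
    rw [pvRotA_mapM]
  have h3 : pvRotA n (pvMapM n (fun i j => g (n-1-i) (n-1-j))) = pvMapM n (fun i j => g j (n-1-i)) := by
    rw [pvRotA_mapM]
    refine pvMapM_congr _ _ _ ?_
    intro i hi j hj
    show g (n-1-(n-1-j)) (n-1-i) = g j (n-1-i)
    congr 1
    omega
  have h4 : pvRotA n (pvMapM n (fun i j => g j (n-1-i))) = pvMapM n (fun i j => g i j) := by
    rw [pvRotA_mapM]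
    refine pvMapM_congr _ _ _ ?_
    intro i hi j hj
    show g i (n-1-(n-1-j)) = g i j
    congr 1
    omega
  show pvGoA target n 4 mat = _
  rw [Bool.eq_iff_iff]
  simp only [pvGoA, h1, h2, h3, h4, Bool.or_eq_true, pvMatches_iff]
  by_cases c1 : target = pvMapM n (fun i j => g (n-1-j) i) <;>
  by_cases c2 : target = pvMapM n (fun i j => g (n-1-i) (n-1-j)) <;>
  by_cases c3 : target = pvMapM n (fun i j => g j (n-1-i)) <;>
  by_cases c4 : target = pvMapM n (fun i j => g i j) <;>
  simp [c1, c2, c3, c4]
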